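-- pv_equiv track=rewrite | github.com/m9ra/gomoku_toolkit | bots/minmax_bot2.py | is_pattern_present
-- ===== SOURCE A (Python) =====
-- def is_pattern_present(pattern, target):
--     segment, missing = target
--
--     for i in range(len(segment) - len(pattern) + 1):
--         is_contained = True
--         was_difference = False
--         for pi in range(len(pattern)):
--             if segment[i + pi] != pattern[pi]:
--                 is_contained = False
--                 break
--
--             if segment[i + pi] != missing[i + pi]:
--                 was_difference = True
--
--         if is_contained and was_difference:
--             return True
--
--     return False
-- ===== SOURCE B (Python) =====
-- def is_pattern_present(pattern, target):
--     segment, missing = target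
--     m = len(pattern)
--     # prefix sums of positions where segment differs from missing: the
--     # per-window difference test becomes a single subtraction
--     pre = [0]
--     for s, t in zip(segment, missing):
--         pre.append(pre[-1] + (1 if s != t else 0))
--     return any(segment[i:i + m] == pattern and pre[i + m] - pre[i] > 0
--                for i in range(len(segment) - m + 1))
-- ===== Notes on version B (the rewrite author's own statement) =====
-- stated objective: alternative
-- what changed: Replaces A's nested index loop with per-window flags by a one-time prefix-sum array of segment/missing differences (the inner difference scan disappears, becoming one subtraction per window) plus a slice comparison per window inside a single any().
-- outside the precondition, e.g. on is_pattern_present([], ([6, 3], [])): A returns False, B raises IndexError; on is_pattern_present([1], ([2], [])): A returns False, B returns False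
import Mathlib
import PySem

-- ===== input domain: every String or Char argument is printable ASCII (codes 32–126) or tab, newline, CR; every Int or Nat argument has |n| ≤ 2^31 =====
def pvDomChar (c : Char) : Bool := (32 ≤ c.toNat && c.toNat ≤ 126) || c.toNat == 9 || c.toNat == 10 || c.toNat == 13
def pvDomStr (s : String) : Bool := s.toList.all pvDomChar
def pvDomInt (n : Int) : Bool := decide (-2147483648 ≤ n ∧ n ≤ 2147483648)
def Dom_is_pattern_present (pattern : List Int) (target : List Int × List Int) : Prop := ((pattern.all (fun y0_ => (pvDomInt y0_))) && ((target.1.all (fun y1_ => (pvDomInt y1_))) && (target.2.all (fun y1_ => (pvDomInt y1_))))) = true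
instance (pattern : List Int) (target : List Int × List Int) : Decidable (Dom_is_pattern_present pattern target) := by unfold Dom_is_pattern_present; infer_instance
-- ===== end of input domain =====

-- B replaces A's inner per-window difference scan by a prefix-sum array built once,
-- and the match test by a slice comparison inside a single any() (alternative decomposition, same worst-case cost).


-- ===== PORT A =====
-- inner 'for pi in range(len(pattern))' loop with its two flags and the break
def pvAInner (pattern segment missing : List Int) (i : Int) : List Int → Bool → Bool × Bool
  | [], wasDiff => (true, wasDiff)
  | pi :: rest, wasDiff =>
    if PySem.List.pyGetD segment (i + pi) 0 ≠ PySem.List.pyGetD pattern pi 0 then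
      (false, wasDiff)
    else if PySem.List.pyGetD segment (i + pi) 0 ≠ PySem.List.pyGetD missing (i + pi) 0 then
      pvAInner pattern segment missing i rest true
    else
      pvAInner pattern segment missing i rest wasDiff

-- outer 'for i in range(len(segment) - len(pattern) + 1)' loop with the early return
def pvAOuter (pattern segment missing : List Int) : List Int → Bool
  | [] => false
  | i :: rest =>
    let r := pvAInner pattern segment missing i (PySem.List.pyRange 0 (pattern.length : Int) 1) false
    if r.1 && r.2 then true else pvAOuter pattern segment missing rest

def is_pattern_present (pattern : List Int) (target : List Int × List Int) : Bool :=
  pvAOuter pattern target.1 target.2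
    (PySem.List.pyRange 0 ((target.1.length : Int) - (pattern.length : Int) + 1) 1)

-- ===== PORT B =====
-- 'pre = [0]; for s, t in zip(segment, missing): pre.append(pre[-1] + (1 if s != t else 0))' (tail after the initial 0)
def pvBPre : List (Int × Int) → Int → List Int
  | [], _ => []
  | (s, t) :: rest, acc =>
    let v := acc + (if s ≠ t then 1 else 0)
    v :: pvBPre rest v

-- 'any(segment[i:i+m] == pattern and pre[i+m] - pre[i] > 0 for i in range(...))'
def pvBAny (pattern segment pre : List Int) (m : Int) : List Int → Bool
  | [] => false
  | i :: rest =>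
    if PySem.List.slice segment (some i) (some (i + m)) = pattern ∧
        PySem.List.pyGetD pre (i + m) 0 - PySem.List.pyGetD pre i 0 > 0 then
      true
    else
      pvBAny pattern segment pre m rest

def is_pattern_present_alt (pattern : List Int) (target : List Int × List Int) : Bool :=
  let segment := target.1
  let missing := target.2
  let m : Int := (pattern.length : Int)
  let pre : List Int := 0 :: pvBPre (segment.zip missing) 0
  pvBAny pattern segment pre m (PySem.List.pyRange 0 ((segment.length : Int) - m + 1) 1)

-- ===== PRECONDITION & SPEC =====
-- Pre_ excludes inputs where missing is shorter than segment: there A indexes missing[i+pi]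
-- and raises IndexError as soon as a matching window reaches past missing (on the remaining
-- such inputs A returns only because the inner loop happens to break first, an artefact of
-- the lazy access order), while B's prefix sums over zip(segment, missing) truncate there.
def Pre_is_pattern_present (_pattern : List Int) (target : List Int × List Int) : Prop :=
  target.1.length ≤ target.2.length

instance (pattern : List Int) (target : List Int × List Int) : Decidable (Pre_is_pattern_present pattern target) := by
  unfold Pre_is_pattern_present; infer_instance

def pvWitness_is_pattern_present : List Int × (List Int × List Int) := ([1, 2], ([0, 1, 2, 3], [0, 1, 0, 3]))

def Spec_is_pattern_present (pattern : List Int) (target : List Int × List Int) (out : Bool) : Prop := out = is_pattern_present_alt pattern target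
instance (pattern : List Int) (target : List Int × List Int) (out : Bool) : Decidable (Spec_is_pattern_present pattern target out) := by unfold Spec_is_pattern_present; infer_instance

-- ===== CLAIM (what is proved, stated in full; the proofs are below) =====
def Claim_equal_is_pattern_present : Prop := ∀ (pattern : List Int) (target : List Int × List Int), Dom_is_pattern_present pattern target → Pre_is_pattern_present pattern target → Spec_is_pattern_present pattern target (is_pattern_present pattern target)

-- ===== LEMMAS AND PROOFS =====

-- A's inner loop over any index list: 'contained && was_difference' is 'all match && any diff'
lemma pvAInner_char (p s ms : List Int) (i : Int) :
    ∀ (l : List Int) (w : Bool),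
      ((pvAInner p s ms i l w).1 && (pvAInner p s ms i l w).2)
        = (l.all (fun pi => PySem.List.pyGetD s (i + pi) 0 == PySem.List.pyGetD p pi 0)
            && (w || l.any (fun pi => !(PySem.List.pyGetD s (i + pi) 0 == PySem.List.pyGetD ms (i + pi) 0)))) := by
  intro l
  induction l with
  | nil => intro w; simp [pvAInner]
  | cons pi rest ih =>
    intro w
    by_cases h1 : PySem.List.pyGetD s (i + pi) 0 = PySem.List.pyGetD p pi 0
    · by_cases h2 : PySem.List.pyGetD s (i + pi) 0 = PySem.List.pyGetD ms (i + pi) 0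
      · have h2' : PySem.List.pyGetD p pi 0 = PySem.List.pyGetD ms (i + pi) 0 := h1 ▸ h2
        simp [pvAInner, h1, h2', ih]
      · have h2' : ¬ PySem.List.pyGetD p pi 0 = PySem.List.pyGetD ms (i + pi) 0 := h1 ▸ h2
        simp [pvAInner, h1, h2', ih]
    · simp [pvAInner, h1]

-- the tail of the prefix list: element t is acc plus the number of differing pairs among the first t+1
lemma pvBPre_getD (pairs : List (Int × Int)) :
    ∀ (acc : Int) (t : Nat), t ≤ pairs.length →
      (acc :: pvBPre pairs acc).getD t 0
        = acc + (((pairs.take t).countP (fun q => decide (q.1 ≠ q.2))) : Int) := by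
  induction pairs with
  | nil =>
    intro acc t ht
    have : t = 0 := by simpa using ht
    subst this; simp
  | cons q rest ih =>
    intro acc t ht
    cases t with
    | zero => simp
    | succ t =>
      have ht' : t ≤ rest.length := by simpa using ht
      have := ih (acc + (if q.1 ≠ q.2 then 1 else 0)) t ht'
      by_cases hq : q.1 = q.2
      · simpa [pvBPre, List.countP_cons, hq, add_assoc] using this
      · simpa [pvBPre, List.countP_cons, hq, add_assoc, add_comm, add_left_comm] using this

-- range(len(pattern)) membership as a Nat quantifier
lemma forall_pyRange_nat (M : Nat) (P : Int → Prop) :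
    (∀ pi ∈ PySem.List.pyRange 0 (M : Int) 1, P pi) ↔ ∀ k < M, P k := by
  simp only [PySem.List.mem_pyRange_one]
  constructor
  · intro h k hk
    exact h k ⟨by positivity, by exact_mod_cast hk⟩
  · intro h x ⟨hx0, hxM⟩
    have := h x.toNat (by omega)
    rwa [show ((x.toNat : Nat) : Int) = x by omega] at this

lemma exists_pyRange_nat (M : Nat) (P : Int → Prop) :
    (∃ pi ∈ PySem.List.pyRange 0 (M : Int) 1, P pi) ↔ ∃ k < M, P k := by
  simp only [PySem.List.mem_pyRange_one]
  constructor
  · intro ⟨x, ⟨hx0, hxM⟩, hP⟩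
    refine ⟨x.toNat, by omega, ?_⟩
    rwa [show ((x.toNat : Nat) : Int) = x by omega]
  · intro ⟨k, hk, hP⟩
    exact ⟨k, ⟨by positivity, by exact_mod_cast hk⟩, hP⟩

-- B's slice comparison is A's pointwise window match
lemma match_window (s p : List Int) (j : Nat) (hj : j + p.length ≤ s.length) :
    (PySem.List.slice s (some (j : Int)) (some ((j : Int) + (p.length : Int))) = p)
    ↔ ∀ k < p.length, s.getD (j + k) 0 = p.getD k 0 := by
  rw [PySem.List.slice_natCast_add]
  constructor
  · intro h k hk
    have h1 : j + k < s.length := by omega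
    have h3 := congrArg (fun l => l.getD k 0) h
    simp only at h3
    rw [List.getD_eq_getElem _ 0 (by simp; omega), List.getElem_take, List.getElem_drop] at h3
    rw [List.getD_eq_getElem s 0 h1]
    exact h3
  · intro h
    apply List.ext_getElem
    · simp; omega
    · intro k hk1 hk2
      have hk : k < p.length := by simp at hk1; omega
      have h1 : j + k < s.length := by omega
      rw [List.getElem_take, List.getElem_drop]
      have := h k hk
      rwa [List.getD_eq_getElem s 0 h1, List.getD_eq_getElem p 0 (by omega)] at this

-- B's prefix-sum difference test is A's per-window difference scan
lemma diff_window (s ms : List Int) (j M : Nat)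
    (hms : s.length ≤ ms.length) (hj : j + M ≤ s.length) :
    (PySem.List.pyGetD (0 :: pvBPre (s.zip ms) 0) ((j : Int) + (M : Int)) 0
      - PySem.List.pyGetD (0 :: pvBPre (s.zip ms) 0) (j : Int) 0 > 0)
    ↔ (∃ k < M, s.getD (j + k) 0 ≠ ms.getD (j + k) 0) := by
  have hzlen : (s.zip ms).length = s.length := by rw [List.length_zip]; omega
  rw [show ((j : Int) + (M : Int)) = ((j + M : Nat) : Int) by push_cast; ring]
  rw [PySem.List.pyGetD_natCast, PySem.List.pyGetD_natCast]
  rw [pvBPre_getD _ 0 (j + M) (by omega), pvBPre_getD _ 0 j (by omega)]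
  rw [List.take_add, List.countP_append]
  have hwl : ((s.zip ms).drop j |>.take M).length = M := by
    rw [List.length_take, List.length_drop]; omega
  constructor
  · intro h
    have hpos : 0 < (((s.zip ms).drop j).take M).countP (fun q => decide (q.1 ≠ q.2)) := by omega
    rw [List.countP_pos_iff] at hpos
    obtain ⟨q, hqmem, hq⟩ := hpos
    obtain ⟨k, hk, rfl⟩ := List.getElem_of_mem hqmem
    refine ⟨k, by omega, ?_⟩
    rw [List.getElem_take, List.getElem_drop, List.getElem_zip] at hq
    simp only [decide_eq_true_eq] at hq
    have h1 : j + k < s.length := by omega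
    rw [List.getD_eq_getElem s 0 h1, List.getD_eq_getElem ms 0 (by omega)]
    exact hq
  · intro ⟨k, hk, hne⟩
    have hpos : 0 < (((s.zip ms).drop j).take M).countP (fun q => decide (q.1 ≠ q.2)) := by
      rw [List.countP_pos_iff]
      refine ⟨((s.zip ms).drop j).take M |>.get ⟨k, by omega⟩, List.get_mem _ _, ?_⟩
      simp only [List.get_eq_getElem, List.getElem_take, List.getElem_drop, List.getElem_zip]
      have h1 : j + k < s.length := by omega
      rw [List.getD_eq_getElem s 0 h1, List.getD_eq_getElem ms 0 (by omega)] at hne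
      simpa using hne
    omega

-- one window: A's flag pair equals B's slice-and-prefix-sum test
lemma window_eq (p s ms : List Int) (j : Nat)
    (hms : s.length ≤ ms.length) (hj : j + p.length ≤ s.length) :
    ((pvAInner p s ms (j : Int) (PySem.List.pyRange 0 (p.length : Int) 1) false).1
      && (pvAInner p s ms (j : Int) (PySem.List.pyRange 0 (p.length : Int) 1) false).2)
    = decide (PySem.List.slice s (some (j : Int)) (some ((j : Int) + (p.length : Int))) = p ∧
        PySem.List.pyGetD (0 :: pvBPre (s.zip ms) 0) ((j : Int) + (p.length : Int)) 0
          - PySem.List.pyGetD (0 :: pvBPre (s.zip ms) 0) (j : Int) 0 > 0) := by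
  rw [pvAInner_char, Bool.eq_iff_iff]
  simp only [Bool.and_eq_true, List.all_eq_true, List.any_eq_true, Bool.false_or,
    beq_iff_eq, Bool.not_eq_true', beq_eq_false_iff_ne, decide_eq_true_eq, ne_eq]
  rw [forall_pyRange_nat, exists_pyRange_nat,
    match_window s p j hj, diff_window s ms j p.length hms hj]
  simp only [← Nat.cast_add, PySem.List.pyGetD_natCast, ne_eq]

-- both outer loops over the same index list agree
lemma outer_eq (p s ms : List Int) (hms : s.length ≤ ms.length) :
    ∀ (l : List Int), (∀ i ∈ l, 0 ≤ i ∧ i + (p.length : Int) ≤ (s.length : Int)) →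
      pvAOuter p s ms l
        = pvBAny p s (0 :: pvBPre (s.zip ms) 0) (p.length : Int) l := by
  intro l
  induction l with
  | nil => intro _; simp [pvAOuter, pvBAny]
  | cons i rest ih =>
    intro hl
    obtain ⟨hi0, him⟩ := hl i (by simp)
    obtain ⟨j, rfl⟩ : ∃ j : Nat, i = (j : Int) := ⟨i.toNat, by omega⟩
    have hjm : j + p.length ≤ s.length := by omega
    have hw := window_eq p s ms j hms hjm
    simp only [pvAOuter, pvBAny]
    rw [hw, ih (fun x hx => hl x (List.mem_cons_of_mem _ hx))]
    by_cases hc : (PySem.List.slice s (some (j : Int)) (some ((j : Int) + (p.length : Int))) = p ∧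
        PySem.List.pyGetD (0 :: pvBPre (s.zip ms) 0) ((j : Int) + (p.length : Int)) 0
          - PySem.List.pyGetD (0 :: pvBPre (s.zip ms) 0) (j : Int) 0 > 0)
    · simp [hc]
    · simp only [hc, decide_false, Bool.false_eq_true, if_false]

-- ===== VERDICT (by name: the statement is the Claim_ definition above) =====
theorem is_pattern_present_spec : Claim_equal_is_pattern_present := by
  intro pattern target _hdom hpre
  unfold Spec_is_pattern_present
  obtain ⟨segment, missing⟩ := target
  unfold is_pattern_present is_pattern_present_alt
  simp only
  apply outer_eq pattern segment missing hpre
  intro i hi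
  rw [PySem.List.mem_pyRange_one] at hi
  omega
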